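-- pv_equiv track=rewrite | github.com/heleph4nt/Monopogen_duplicate_calling | src/utils.py | Create_base_call_string
-- ===== SOURCE A (Python) =====
-- def Create_base_call_string(s, ref):
--     # Convert pileup symbols into explicit base calls
--     l = ['.', ',', 'a', 'A', 'c', 'C', 't', 'T', 'g', 'G', '*']
--     sn = ''
--     for i in s:
--         if i in l:
--             sn = sn + i
--     snn = ''
--     for i in sn:
--         if i == '.' or i == ',' or i == '*':
--             snn = snn + ref
--         elif i == 'a':
--             snn = snn + 'A'
--         elif i == 'c':
--             snn = snn + 'C'
--         elif i == 't':
--             snn = snn + 'T'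
--         elif i == 'g':
--             snn = snn + 'G'
--         else:
--             snn = snn + i
--     return snn
-- ===== SOURCE B (Python) =====
-- def Create_base_call_string(s, ref):
--     # One table-driven pass instead of filter pass + if/elif pass
--     table = {'.': ref, ',': ref, '*': ref,
--              'a': 'A', 'A': 'A', 'c': 'C', 'C': 'C',
--              't': 'T', 'T': 'T', 'g': 'G', 'G': 'G'}
--     return ''.join(table[c] for c in s if c in table)
-- ===== Notes on version B (the rewrite author's own statement) =====
-- stated objective: idiomatic
-- what changed: Replaces the two sequential accumulator loops (a filter pass then an if/elif mapping pass) by one precomputed dict translation table and a single join over the input.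
import Mathlib
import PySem

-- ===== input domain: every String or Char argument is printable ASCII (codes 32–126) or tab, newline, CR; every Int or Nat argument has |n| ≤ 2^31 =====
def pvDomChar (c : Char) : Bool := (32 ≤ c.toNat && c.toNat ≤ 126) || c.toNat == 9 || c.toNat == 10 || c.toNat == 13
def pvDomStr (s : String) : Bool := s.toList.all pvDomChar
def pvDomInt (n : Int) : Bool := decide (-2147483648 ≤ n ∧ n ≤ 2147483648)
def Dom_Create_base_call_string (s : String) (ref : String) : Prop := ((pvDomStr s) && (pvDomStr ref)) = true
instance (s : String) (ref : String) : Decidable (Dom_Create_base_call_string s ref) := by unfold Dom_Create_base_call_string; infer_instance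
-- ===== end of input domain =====

-- B replaces A's two accumulator loops (filter pass, then if/elif mapping pass) by one
-- precomputed dict translation table and a single join pass (objective: idiomatic).

-- ===== PORT A =====
-- strings are carried as List Char (PySem convention) and packed with String.mk at the end
def Create_base_call_string (s : String) (ref : String) : String :=
  let l : List Char := ['.', ',', 'a', 'A', 'c', 'C', 't', 'T', 'g', 'G', '*']
  let sn : List Char := s.toList.foldl (fun sn i => if i ∈ l then sn ++ [i] else sn) []
  let snn : List Char := sn.foldl (fun snn i =>
      if i = '.' ∨ i = ',' ∨ i = '*' then snn ++ ref.toList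
      else if i = 'a' then snn ++ ['A']
      else if i = 'c' then snn ++ ['C']
      else if i = 't' then snn ++ ['T']
      else if i = 'g' then snn ++ ['G']
      else snn ++ [i]) []
  String.mk snn

-- ===== PORT B =====
def pvTable (ref : String) : PySem.Dict Char String :=
  PySem.Dict.ofList
    [('.', ref), (',', ref), ('*', ref),
     ('a', "A"), ('A', "A"), ('c', "C"), ('C', "C"),
     ('t', "T"), ('T', "T"), ('g', "G"), ('G', "G")]

-- ''.join(table[c] for c in s if c in table) : the filter+lookup is filterMap get?
def Create_base_call_string_alt (s : String) (ref : String) : String :=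
  String.mk ((s.toList.filterMap (fun c => (pvTable ref).get? c)).flatMap String.toList)

-- ===== PRECONDITION & SPEC =====
def Spec_Create_base_call_string (s : String) (ref : String) (out : String) : Prop := out = Create_base_call_string_alt s ref
instance (s : String) (ref : String) (out : String) : Decidable (Spec_Create_base_call_string s ref out) := by unfold Spec_Create_base_call_string; infer_instance

-- ===== CLAIM (what is proved, stated in full; the proofs are below) =====
def Claim_equal_Create_base_call_string : Prop := ∀ (s : String) (ref : String), Dom_Create_base_call_string s ref → Spec_Create_base_call_string s ref (Create_base_call_string s ref)

-- ===== LEMMAS AND PROOFS =====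

def pvL : List Char := ['.', ',', 'a', 'A', 'c', 'C', 't', 'T', 'g', 'G', '*']

def pvG (ref : String) (i : Char) : List Char :=
  if i = '.' ∨ i = ',' ∨ i = '*' then ref.toList
  else if i = 'a' then ['A']
  else if i = 'c' then ['C']
  else if i = 't' then ['T']
  else if i = 'g' then ['G']
  else [i]

lemma pv_step (ref : String) (c : Char) :
    (if c ∈ pvL then pvG ref c else []) = ((pvTable ref).get? c).elim [] String.toList := by
  by_cases h1 : c = '.'
  · subst h1; simp [pvL, pvG, pvTable, PySem.Dict.ofList, PySem.Dict.update, List.foldl, PySem.Dict.get?_insert]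
  by_cases h2 : c = ','
  · subst h2; simp [pvL, pvG, pvTable, PySem.Dict.ofList, PySem.Dict.update, List.foldl, PySem.Dict.get?_insert]
  by_cases h3 : c = 'a'
  · subst h3; simp [pvL, pvG, pvTable, PySem.Dict.ofList, PySem.Dict.update, List.foldl, PySem.Dict.get?_insert]
  by_cases h4 : c = 'A'
  · subst h4; simp [pvL, pvG, pvTable, PySem.Dict.ofList, PySem.Dict.update, List.foldl, PySem.Dict.get?_insert]
  by_cases h5 : c = 'c'
  · subst h5; simp [pvL, pvG, pvTable, PySem.Dict.ofList, PySem.Dict.update, List.foldl, PySem.Dict.get?_insert]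
  by_cases h6 : c = 'C'
  · subst h6; simp [pvL, pvG, pvTable, PySem.Dict.ofList, PySem.Dict.update, List.foldl, PySem.Dict.get?_insert]
  by_cases h7 : c = 't'
  · subst h7; simp [pvL, pvG, pvTable, PySem.Dict.ofList, PySem.Dict.update, List.foldl, PySem.Dict.get?_insert]
  by_cases h8 : c = 'T'
  · subst h8; simp [pvL, pvG, pvTable, PySem.Dict.ofList, PySem.Dict.update, List.foldl, PySem.Dict.get?_insert]
  by_cases h9 : c = 'g'
  · subst h9; simp [pvL, pvG, pvTable, PySem.Dict.ofList, PySem.Dict.update, List.foldl, PySem.Dict.get?_insert]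
  by_cases h10 : c = 'G'
  · subst h10; simp [pvL, pvG, pvTable, PySem.Dict.ofList, PySem.Dict.update, List.foldl]
  by_cases h11 : c = '*'
  · subst h11; simp [pvL, pvG, pvTable, PySem.Dict.ofList, PySem.Dict.update, List.foldl, PySem.Dict.get?_insert]
  simp [pvL, pvTable, PySem.Dict.ofList, PySem.Dict.update, List.foldl, PySem.Dict.get?_insert,
        h1, h2, h3, h4, h5, h6, h7, h8, h9, h10, h11]

lemma pv_core (ref : String) (cs : List Char) :
    (cs.filter (fun i => decide (i ∈ pvL))).flatMap (pvG ref)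
      = (cs.filterMap (fun c => (pvTable ref).get? c)).flatMap String.toList := by
  induction cs with
  | nil => rfl
  | cons c cs ih =>
      have h := pv_step ref c
      simp only [List.filter_cons, List.filterMap_cons]
      cases hg : (pvTable ref).get? c with
      | none =>
          rw [hg] at h
          by_cases hc : c ∈ pvL
          · simp only [if_pos hc, Option.elim] at h
            simp [hc, h, ih]
          · simp [hc, ih]
      | some t =>
          rw [hg] at h
          by_cases hc : c ∈ pvL
          · simp only [if_pos hc, Option.elim] at h
            simp [hc, List.flatMap_cons, h, ih]
          · simp only [if_neg hc, Option.elim] at h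
            simp [hc, List.flatMap_cons, ← h, ih]

-- ===== VERDICT (by name: the statement is the Claim_ definition above) =====
theorem Create_base_call_string_spec : Claim_equal_Create_base_call_string := by
  intro s ref _
  show _ = _
  unfold Create_base_call_string Create_base_call_string_alt
  simp only []
  rw [PySem.List.foldl_append_ite_eq_filter]
  have hfun : (fun (snn : List Char) (i : Char) =>
      if i = '.' ∨ i = ',' ∨ i = '*' then snn ++ ref.toList
      else if i = 'a' then snn ++ ['A']
      else if i = 'c' then snn ++ ['C']
      else if i = 't' then snn ++ ['T']
      else if i = 'g' then snn ++ ['G']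
      else snn ++ [i]) = fun snn i => snn ++ pvG ref i := by
    funext snn i
    simp only [pvG]
    split_ifs <;> rfl
  rw [hfun, PySem.List.foldl_append_eq_flatMap]
  simp only [List.nil_append]
  congr 1
  exact pv_core ref s.toList
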